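-- pv_equiv track=rewrite | github.com/arittung/Coding_Test | Baekjoon/7572.py | calc
-- ===== SOURCE A (Python) =====
-- def calc(n):
--     a_num = 0
--     b_num = 6
--     if(n >= 0):
--         for i in range(n):
--             if a_num <9:
--                 a_num+=1
--             else:
--                 a_num = 0
--
--             if b_num < 11:
--                 b_num +=1
--             else:
--                 b_num = 0
--
--     else:
--         n *= (-1)
--         for i in range(n):
--             if a_num > 0:
--                 a_num -= 1
--             else:
--                 a_num = 9
--
--             if b_num > 0:
--                 b_num -= 1
--             else:
--                 b_num = 11
--     return a_num, b_num
-- ===== SOURCE B (Python) =====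
-- def calc(n):
--     # closed form: both counters are cyclic, so just use modular arithmetic
--     return n % 10, (6 + n) % 12
-- ===== Notes on version B (the rewrite author's own statement) =====
-- stated objective: faster
-- what changed: Replaces the O(|n|) step-by-step loop over the two cyclic counters with the closed-form modular expressions n % 10 and (6 + n) % 12.
import Mathlib
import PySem

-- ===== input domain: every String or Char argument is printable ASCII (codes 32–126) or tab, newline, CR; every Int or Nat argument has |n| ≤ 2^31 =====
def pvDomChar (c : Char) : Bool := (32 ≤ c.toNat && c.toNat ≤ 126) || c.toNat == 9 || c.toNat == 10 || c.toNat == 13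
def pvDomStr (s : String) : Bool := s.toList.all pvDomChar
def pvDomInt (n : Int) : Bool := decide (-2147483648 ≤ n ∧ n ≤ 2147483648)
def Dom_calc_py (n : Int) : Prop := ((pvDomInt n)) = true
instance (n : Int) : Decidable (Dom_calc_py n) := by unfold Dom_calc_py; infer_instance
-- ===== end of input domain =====

-- B replaces A's O(|n|) step-by-step loop with the closed forms n % 10 and (6+n) % 12 (faster).

-- ===== PORT A =====
-- one iteration of A's forward loop body
def pvStepUp (s : Int × Int) : Int × Int :=
  ((if s.1 < 9 then s.1 + 1 else 0), (if s.2 < 11 then s.2 + 1 else 0))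

-- one iteration of A's backward loop body
def pvStepDn (s : Int × Int) : Int × Int :=
  ((if s.1 > 0 then s.1 - 1 else 9), (if s.2 > 0 then s.2 - 1 else 11))

def calc_py (n : Int) : List Int :=
  let a_num : Int := 0
  let b_num : Int := 6
  if n ≥ 0 then
    let s := (PySem.List.pyRange 0 n 1).foldl (fun s _ => pvStepUp s) (a_num, b_num)
    [s.1, s.2]
  else
    let n' := n * (-1)
    let s := (PySem.List.pyRange 0 n' 1).foldl (fun s _ => pvStepDn s) (a_num, b_num)
    [s.1, s.2]

-- ===== PORT B =====
def calc_py_alt (n : Int) : List Int :=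
  [PySem.Int.mod n 10, PySem.Int.mod (6 + n) 12]

-- ===== PRECONDITION & SPEC =====
def Spec_calc_py (n : Int) (out : List Int) : Prop := out = calc_py_alt n
instance (n : Int) (out : List Int) : Decidable (Spec_calc_py n out) := by unfold Spec_calc_py; infer_instance

-- ===== CLAIM (what is proved, stated in full; the proofs are below) =====
def Claim_equal_calc_py : Prop := ∀ (n : Int), Dom_calc_py n → Spec_calc_py n (calc_py n)

-- ===== LEMMAS AND PROOFS =====

theorem pv_foldl_const {α β : Type} (f : α → α) (l : List β) (init : α) :
    l.foldl (fun s _ => f s) init = f^[l.length] init := by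
  induction l generalizing init with
  | nil => rfl
  | cons x xs ih => simp [List.foldl_cons, ih, Function.iterate_succ_apply]

theorem pv_iter_up (m : Nat) :
    pvStepUp^[m] ((0 : Int), (6 : Int)) = ((m : Int) % 10, (6 + (m : Int)) % 12) := by
  induction m with
  | zero => decide
  | succ k ih =>
    rw [Function.iterate_succ_apply', ih]
    simp only [pvStepUp, Prod.ext_iff]
    push_cast
    constructor <;> split_ifs <;> omega

theorem pv_iter_dn (m : Nat) :
    pvStepDn^[m] ((0 : Int), (6 : Int)) = ((-(m : Int)) % 10, (6 - (m : Int)) % 12) := by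
  induction m with
  | zero => decide
  | succ k ih =>
    rw [Function.iterate_succ_apply', ih]
    simp only [pvStepDn, Prod.ext_iff]
    push_cast
    constructor <;> split_ifs <;> omega

-- ===== VERDICT (by name: the statement is the Claim_ definition above) =====
theorem calc_py_spec : Claim_equal_calc_py := by
  intro n _
  unfold Spec_calc_py calc_py calc_py_alt
  by_cases hn : n ≥ 0
  · simp only [hn, if_pos]
    rw [pv_foldl_const, PySem.List.length_pyRange_one, pv_iter_up]
    have h : ((n - 0).toNat : Int) = n := by omega
    rw [h, PySem.Int.mod_eq_emod_of_pos (by norm_num),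
        PySem.Int.mod_eq_emod_of_pos (by norm_num)]
  · simp only [hn, if_false]
    rw [pv_foldl_const, PySem.List.length_pyRange_one, pv_iter_dn]
    have h : ((n * (-1) - 0).toNat : Int) = -n := by omega
    rw [h, PySem.Int.mod_eq_emod_of_pos (by norm_num),
        PySem.Int.mod_eq_emod_of_pos (by norm_num)]
    norm_num
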